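-- pv_equiv track=rewrite | github.com/renzol2/mus105-fall19 | hw0/Homework0.py | remove_substring_instances
-- ===== SOURCE A (Python) =====
-- def remove_substring_instances(in_str, substr):
--     """
--     given the string input, find all instances of substr and remove them from the input. Then, return the number of
--     instances of substr that were removed, as well as the new string with all instances of substr removed, as a tuple.
--     for example:
--         return num_instances, new_string
--
--     :param in_str: string to clean up
--     :type in_str: str
--     :param substr: substring to find and remove
--     :type substr: str
--     :return: a tuple where the first element is the number of elements removed, and the second is the string after
--         cleaning
--     :rtype: tuple
--     """
--     # replace the line below with your code
--     counter = 0
--     while True:  # infinite loop (with break statement)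
--         in_list = list(in_str)  # convert in_str to a list to more easily remove substrings
--
--         if in_str.find(substr) == -1:  # basically 'if no more instances of substring are found'
--             break
--
--         counter += 1  # got past the break statement -> substr has been found!
--
--         for i in range(0, len(substr)):  # removes entire instance of substr
--             in_list.pop(in_str.index(substr))
--
--         new_string = ""
--         for item in in_list:
--             new_string += item  # creates new string after popping one
--         in_str = new_string     # instance of substr, replaces in_str, and looks again
--
--     return counter, in_str
-- ===== SOURCE B (Python) =====
-- def remove_substring_instances(in_str, substr):
--     m = len(substr)
--     tail = list(substr)
--     stack = []
--     count = 0
--     for ch in in_str: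
--         stack.append(ch)
--         if stack[-m:] == tail:
--             del stack[-m:]
--             count += 1
--     return count, "".join(stack)
-- ===== Notes on version B (the rewrite author's own statement) =====
-- stated objective: alternative
-- what changed: A repeatedly re-scans the whole string for the leftmost occurrence, pops it character by character and rebuilds the string by concatenation; B does a single left-to-right stack scan, pushing characters and popping (and counting) whenever the stack ends with substr.
-- outside the precondition, e.g. on remove_substring_instances('xa', ''): A does not finish within the time limit, B returns (0, 'xa')
import Mathlib
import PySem

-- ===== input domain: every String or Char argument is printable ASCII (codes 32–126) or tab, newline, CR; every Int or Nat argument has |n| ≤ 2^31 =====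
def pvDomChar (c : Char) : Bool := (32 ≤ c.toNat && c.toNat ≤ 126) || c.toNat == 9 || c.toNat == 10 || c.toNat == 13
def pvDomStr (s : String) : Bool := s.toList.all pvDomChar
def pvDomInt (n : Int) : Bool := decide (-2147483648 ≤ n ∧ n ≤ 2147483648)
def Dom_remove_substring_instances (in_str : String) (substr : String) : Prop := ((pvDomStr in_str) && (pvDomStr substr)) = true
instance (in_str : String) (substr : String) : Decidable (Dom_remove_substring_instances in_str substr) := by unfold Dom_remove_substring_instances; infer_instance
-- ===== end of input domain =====

-- B replaces A's repeated find-leftmost-and-rebuild loop by a single left-to-right stack scan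
-- (push each char, pop and count when the stack ends with substr); objective: alternative.

-- ===== PORT A =====
-- `in_list.pop(i)`; the `none` branch (Python's IndexError) is unreachable at A's guarded call site.
def pvPopAt (l : List Char) (i : Int) : List Char :=
  match PySem.List.pop? l i with
  | some r => r.2
  | none => l

-- the `while True` loop of A; fuel only makes it total (s.length + 1 suffices whenever
-- substr ≠ "", since each found instance shortens the string by len(substr) ≥ 1)
def pvLoopA : Nat → List Char → List Char → Int → Int × List Char
  | 0, s, _, c => (c, s)
  | fuel+1, s, p, c =>
    let in_list := s
    if PySem.Chars.find s p = -1 then (c, s)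
    else
      let c := c + 1
      let in_list := (PySem.List.pyRange 0 (p.length : Int)).foldl
        (fun acc _ => pvPopAt acc (PySem.Chars.find s p)) in_list
      let new_string := in_list.foldl (fun acc ch => acc ++ [ch]) ([] : List Char)
      pvLoopA fuel new_string p c

def remove_substring_instances (in_str : String) (substr : String) : Int × String :=
  let r := pvLoopA (in_str.toList.length + 1) in_str.toList substr.toList 0
  (r.1, String.ofList r.2)

-- ===== PORT B =====
-- one iteration of Source B's for-loop: push ch, then pop+count if stack[-m:] == tail
def pvAltStep (m : Nat) (tail : List Char) (st : List Char × Int) (ch : Char) : List Char × Int :=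
  let stack := st.1 ++ [ch]
  if PySem.List.slice stack (some (-(m : Int))) none = tail then
    (PySem.List.slice stack none (some (-(m : Int))), st.2 + 1)
  else (stack, st.2)

def remove_substring_instances_alt (in_str : String) (substr : String) : Int × String :=
  let m := substr.toList.length
  let tail := substr.toList
  let r := in_str.toList.foldl (pvAltStep m tail) ([], 0)
  (r.2, String.ofList r.1)

-- ===== PRECONDITION & SPEC =====
-- Pre_ excludes only substr = "", on which A's while-loop never terminates (find("") = 0 and nothing is popped).
def Pre_remove_substring_instances (in_str : String) (substr : String) : Prop := substr ≠ ""
instance (in_str : String) (substr : String) : Decidable (Pre_remove_substring_instances in_str substr) := by unfold Pre_remove_substring_instances; infer_instance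

def pvWitness_remove_substring_instances : String × String := ("abcabca", "bc")

def Spec_remove_substring_instances (in_str : String) (substr : String) (out : Int × String) : Prop := out = remove_substring_instances_alt in_str substr
instance (in_str : String) (substr : String) (out : Int × String) : Decidable (Spec_remove_substring_instances in_str substr out) := by unfold Spec_remove_substring_instances; infer_instance

-- ===== CLAIM (what is proved, stated in full; the proofs are below) =====
def Claim_equal_remove_substring_instances : Prop := ∀ (in_str : String) (substr : String), Dom_remove_substring_instances in_str substr → Pre_remove_substring_instances in_str substr → Spec_remove_substring_instances in_str substr (remove_substring_instances in_str substr)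

-- ===== LEMMAS AND PROOFS =====

-- Source B's test `stack[-m:] == tail` (m = tail.length ≥ 1) is exactly "tail is a suffix of stack"
theorem pvCondIffSuffix (p stack : List Char) (hp : p ≠ []) :
    (PySem.List.slice stack (some (-(p.length : Int))) none = p) ↔ p <:+ stack := by
  rw [PySem.List.slice_from_neg_natCast stack p.length (List.length_pos_iff.mpr hp)]
  constructor
  · intro h; rw [← h]; exact List.drop_suffix _ _
  · rintro ⟨t, rfl⟩
    have : (t ++ p).length - p.length = t.length := by simp
    rw [this, List.drop_left]

-- while no suffix of the processed prefix equals p, the scan only pushes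
theorem pvScanNoPop (p : List Char) (hp : p ≠ []) :
    ∀ (l st : List Char) (c : Int),
      (∀ t, t <+: l → t ≠ [] → ¬ p <:+ (st ++ t)) →
      List.foldl (pvAltStep p.length p) (st, c) l = (st ++ l, c)
  | [], st, c, _ => by simp
  | ch :: l, st, c, h => by
    have hcond : ¬ p <:+ (st ++ [ch]) :=
      h [ch] ⟨l, rfl⟩ (by simp)
    have hstep : pvAltStep p.length p (st, c) ch = (st ++ [ch], c) := by
      simp only [pvAltStep]
      rw [if_neg (fun hc => hcond ((pvCondIffSuffix p (st ++ [ch]) hp).mp hc))]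
    rw [List.foldl_cons, hstep,
      pvScanNoPop p hp l (st ++ [ch]) c
        (fun t ht htne => by
          obtain ⟨r, rfl⟩ := ht
          have := h (ch :: t) ⟨r, rfl⟩ (by simp)
          simpa [List.append_assoc] using this)]
    simp

-- a stack with no occurrence of p behaves like freshly rescanned input
theorem pvScanAbsorb (p : List Char) (hp : p ≠ []) (st l : List Char) (c : Int)
    (hst : ¬ p <:+: st) :
    List.foldl (pvAltStep p.length p) (st, c) l
      = List.foldl (pvAltStep p.length p) (([] : List Char), c) (st ++ l) := by
  rw [List.foldl_append]
  rw [pvScanNoPop p hp st [] c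
    (fun t ht _ hsuf => hst (by simpa using hsuf.isInfix.trans ht.isInfix))]
  simp

-- removing the leftmost occurrence of p commutes with the scan (count goes up by one)
theorem pvScanRemove (p : List Char) (hp : p ≠ []) (u v : List Char) (c : Int)
    (hmin : ∀ j, j < u.length → ¬ p <+: (u ++ p ++ v).drop j) :
    List.foldl (pvAltStep p.length p) (([] : List Char), c) (u ++ p ++ v)
      = List.foldl (pvAltStep p.length p) (([] : List Char), c + 1) (u ++ v) := by
  obtain ⟨q, a, hqa⟩ : ∃ q a, q ++ [a] = p := ⟨p.dropLast, p.getLast hp, List.dropLast_concat_getLast hp⟩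
  have hql : q.length + 1 = p.length := by rw [← hqa]; simp
  -- no pop while scanning u ++ q
  have h1 : List.foldl (pvAltStep p.length p) (([] : List Char), c) (u ++ q) = (u ++ q, c) := by
    apply pvScanNoPop p hp
    intro t ht htne hsuf
    obtain ⟨t', rfl⟩ := hsuf
    obtain ⟨r, hr⟩ := ht
    have hpre : (u ++ q) ++ ((a :: v)) = u ++ p ++ v := by
      rw [← hqa]; simp
    have hdrop : p <+: (u ++ p ++ v).drop t'.length := by
      rw [← hpre, ← hr]
      refine ⟨r ++ (a :: v), ?_⟩
      rw [show (t' ++ p) ++ r ++ (a :: v) = t' ++ (p ++ r ++ (a :: v)) by simp,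
        List.drop_append]
      simp
    have hlen : t'.length + p.length ≤ u.length + q.length := by
      have := congrArg List.length hr
      simp at this
      omega
    exact hmin t'.length (by omega) hdrop
  have hassoc : u ++ p ++ v = (u ++ q) ++ ([a] ++ v) := by rw [← hqa]; simp
  rw [hassoc, List.foldl_append, h1, List.foldl_append, List.foldl_cons, List.foldl_nil]
  -- the step at a pops p and counts
  have hstep : pvAltStep p.length p (u ++ q, c) a = (u, c + 1) := by
    simp only [pvAltStep]
    have hsfx : p <:+ ((u ++ q) ++ [a]) := by
      rw [show (u ++ q) ++ [a] = u ++ (q ++ [a]) by simp, hqa]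
      exact List.suffix_append u p
    rw [if_pos ((pvCondIffSuffix p _ hp).mpr hsfx)]
    have : PySem.List.slice ((u ++ q) ++ [a]) none (some (-(p.length : Int)))
        = u := by
      rw [PySem.List.slice_to_neg_natCast _ p.length (List.length_pos_iff.mpr hp)]
      have : ((u ++ q) ++ [a]).length - p.length = u.length := by simp; omega
      rw [this, show (u ++ q) ++ [a] = u ++ (q ++ [a]) by simp,
        List.take_append_of_le_length (le_refl _), List.take_length]
    rw [this]
  rw [hstep]
  -- u is occurrence-free, so the stack u absorbs
  apply pvScanAbsorb p hp
  rintro ⟨x, y, hxy⟩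
  have hx : x.length < u.length := by
    have : x.length + p.length + y.length = u.length := by
      rw [← hxy]; simp; omega
    have hp1 : 0 < p.length := List.length_pos_iff.mpr hp
    omega
  apply hmin x.length hx
  rw [← hxy, show (x ++ p ++ y) ++ p ++ v = x ++ (p ++ y ++ p ++ v) by simp,
    List.drop_append]
  simp

-- popping at index i, m times, erases s[i:i+m]
theorem pvPopsErase : ∀ (m : Nat) (s : List Char) (i : Nat), i + m ≤ s.length →
    (PySem.List.pyRange 0 (m : Int)).foldl (fun acc _ => pvPopAt acc (i : Int)) s
      = s.take i ++ s.drop (i + m)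
  | 0, s, i, h => by
    have hr : PySem.List.pyRange 0 ((0 : Nat) : Int) = [] := by simp [pysem]
    rw [hr, List.foldl_nil, Nat.add_zero, List.take_append_drop]
  | m+1, s, i, h => by
    have hr : PySem.List.pyRange 0 ((m+1 : Nat) : Int)
        = PySem.List.pyRange 0 ((m : Nat) : Int) ++ [(m : Int)] := by
      have := PySem.List.pyRange_one_succ_right (a := 0) (b := (m : Int)) (by positivity)
      simpa using this
    have hcast : ((m : Nat) : Int) + 1 = ((m+1 : Nat) : Int) := by push_cast; ring
    rw [show ((m+1 : Nat) : Int) = ((m : Nat) : Int) + 1 from by push_cast; ring] at hr ⊢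
    rw [hr, List.foldl_append, pvPopsErase m s i (by omega), List.foldl_cons, List.foldl_nil]
    set L := s.take i ++ s.drop (i + m) with hL
    have hiL : i < L.length := by
      have : L.length = i + (s.length - (i + m)) := by
        simp [hL]; omega
      omega
    have hpop : pvPopAt L (i : Int) = L.eraseIdx i := by
      simp [pvPopAt, PySem.List.pop?_natCast L i hiL]
    rw [hpop, List.eraseIdx_eq_take_drop_succ]
    have ht : L.take i = s.take i := by
      rw [hL, List.take_append_of_le_length (by simp; omega), List.take_take]
      simp
    have hd : L.drop (i+1) = s.drop (i + (m+1)) := by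
      rw [hL, List.drop_append]
      have h1 : (s.take i).drop (i+1) = [] := List.drop_eq_nil_of_le (by simp)
      have h2 : (i+1) - (s.take i).length = 1 := by simp; omega
      rw [h1, h2, List.nil_append, List.drop_drop]
      congr 1
    rw [ht, hd]

-- A's fuelled loop equals B's scan (for p ≠ [] and enough fuel)
theorem pvLoopEqScan (p : List Char) (hp : p ≠ []) :
    ∀ (fuel : Nat) (s : List Char) (c : Int), s.length < fuel →
      pvLoopA fuel s p c
        = ((List.foldl (pvAltStep p.length p) (([] : List Char), c) s).2,
           (List.foldl (pvAltStep p.length p) (([] : List Char), c) s).1) := by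
  intro fuel
  induction fuel with
  | zero => intro s c h; omega
  | succ n ih =>
    intro s c hlen
    by_cases hfind : PySem.Chars.find s p = -1
    · have hninf : ¬ p <:+: s := (PySem.Chars.find_eq_neg_one_iff s p).mp hfind
      have hscan := pvScanNoPop p hp s [] c
        (fun t ht _ hsuf => hninf ((by simpa using hsuf : p <:+ t).isInfix.trans ht.isInfix))
      simp only [pvLoopA]
      rw [if_pos hfind, hscan]
      simp
    · have h0 : 0 ≤ PySem.Chars.find s p := by
        rcases (PySem.Chars.neg_one_le_find s p).lt_or_eq with h | h
        · omega
        · exact absurd h.symm hfind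
      set i : Nat := (PySem.Chars.find s p).toNat with hi
      have hfi : PySem.Chars.find s p = (i : Int) := (Int.toNat_of_nonneg h0).symm
      have hspec := PySem.Chars.findFrom_natCast_spec s p 0 (Nat.zero_le _)
        (by rw [Nat.cast_zero, PySem.Chars.findFrom_zero]; exact hfind)
      rw [Nat.cast_zero, PySem.Chars.findFrom_zero] at hspec
      obtain ⟨-, hpre, hmin⟩ := hspec
      obtain ⟨w, hw⟩ := hpre
      have hile : i ≤ s.length := by
        have hfl := PySem.Chars.find_le_length s p
        omega
      have hlenw : i + p.length + w.length = s.length := by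
        have := congrArg List.length hw
        simp at this
        omega
      have hm1 : 0 < p.length := List.length_pos_iff.mpr hp
      have hsplit : s = s.take i ++ p ++ w := by
        conv_lhs => rw [← List.take_append_drop i s, ← hw]
        simp
      have hwdrop : s.drop (i + p.length) = w := by
        have h3 : List.drop p.length (List.drop i s) = w := by
          rw [← hw, List.drop_left]
        rw [List.drop_drop] at h3
        exact h3
      have hpop := pvPopsErase p.length s i (by omega)
      have hstepA : pvLoopA (n+1) s p c = pvLoopA n (s.take i ++ w) p (c+1) := by
        simp only [pvLoopA]
        rw [if_neg hfind, hfi, hpop, PySem.List.foldl_append_singleton, hwdrop,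
          List.nil_append]
      have hscanrm : List.foldl (pvAltStep p.length p) (([] : List Char), c) s
          = List.foldl (pvAltStep p.length p) (([] : List Char), c+1) (s.take i ++ w) := by
        conv_lhs => rw [hsplit]
        apply pvScanRemove p hp _ _ c
        intro j hj
        rw [← hsplit]
        have hj' : j < i := by
          have : (s.take i).length = i := by simp [List.length_take]; omega
          omega
        exact hmin j (Nat.zero_le j) (by omega)
      rw [hstepA, hscanrm]
      exact ih _ _ (by simp [List.length_take]; omega)

-- ===== VERDICT (by name: the statement is the Claim_ definition above) =====
theorem remove_substring_instances_spec : Claim_equal_remove_substring_instances := by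
  intro in_str substr _ hpre
  unfold Spec_remove_substring_instances
  have hp : substr.toList ≠ [] := fun h => hpre (String.toList_eq_nil_iff.mp h)
  unfold remove_substring_instances remove_substring_instances_alt
  rw [pvLoopEqScan substr.toList hp (in_str.toList.length + 1) in_str.toList 0 (by omega)]
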